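-- pv_equiv track=rewrite | github.com/Johan5434/herring-haul-mix-software | Pipeline version 2/generate_simulated_hauls.py | get_individuals_per_population
-- ===== SOURCE A (Python) =====
-- def get_individuals_per_population(sample_to_pop, qc_passed_filter=None):
--     """
--     Return a dict: population -> list of sample_ids.
--     Populations: Autumn, North, Central, South.
--
--     If qc_passed_filter is provided (list of sample IDs), only use those individuals.
--     """
--     qc_set = set(qc_passed_filter) if qc_passed_filter else None
--
--     pop_to_samples = {
--         "Autumn": [],
--         "North": [],
--         "Central": [],
--         "South": []
--     }
--     for sample_id, pop in sample_to_pop.items():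
--         # Filter by QC-passed if provided
--         if qc_set and sample_id not in qc_set:
--             continue
--         if pop in pop_to_samples:
--             pop_to_samples[pop].append(sample_id)
--     return pop_to_samples
-- ===== SOURCE B (Python) =====
-- def get_individuals_per_population(sample_to_pop, qc_passed_filter=None):
--     qc_set = set(qc_passed_filter) if qc_passed_filter else None
--
--     def keep(sid):
--         return qc_set is None or sid in qc_set
--
--     return {pop: [sid for sid, p in sample_to_pop.items() if p == pop and keep(sid)]
--             for pop in ("Autumn", "North", "Central", "South")}
-- ===== Notes on version B (the rewrite author's own statement) =====
-- stated objective: alternative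
-- what changed: Replaces the single bucket-dispatch loop that mutates a pre-seeded dict with a dict comprehension that runs four independent filtering scans, one per fixed population name.
import Mathlib
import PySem

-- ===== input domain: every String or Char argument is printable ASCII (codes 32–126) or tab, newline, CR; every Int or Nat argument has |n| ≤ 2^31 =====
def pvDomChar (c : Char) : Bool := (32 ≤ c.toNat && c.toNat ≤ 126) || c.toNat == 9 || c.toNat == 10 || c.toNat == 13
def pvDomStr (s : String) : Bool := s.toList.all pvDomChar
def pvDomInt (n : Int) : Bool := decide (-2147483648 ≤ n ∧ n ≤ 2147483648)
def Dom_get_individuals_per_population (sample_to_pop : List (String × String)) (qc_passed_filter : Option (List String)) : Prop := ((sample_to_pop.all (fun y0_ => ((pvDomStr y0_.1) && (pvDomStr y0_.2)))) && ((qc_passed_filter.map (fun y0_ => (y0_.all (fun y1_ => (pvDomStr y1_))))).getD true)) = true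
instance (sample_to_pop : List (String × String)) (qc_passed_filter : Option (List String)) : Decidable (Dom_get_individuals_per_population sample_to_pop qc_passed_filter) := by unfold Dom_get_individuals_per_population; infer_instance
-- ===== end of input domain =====

-- B replaces A's single bucket-dispatch loop over a pre-seeded dict with four
-- independent filtering scans, one per fixed population name (alternative decomposition).

-- ===== PORT A =====
def get_individuals_per_population (sample_to_pop : List (String × String)) (qc_passed_filter : Option (List String)) : List (String × List String) :=
  -- qc_set = set(qc_passed_filter) if qc_passed_filter else None  (empty list is falsy)
  let qc_set : Option (PySem.Set String) :=
    match qc_passed_filter with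
    | some l => if l.isEmpty then none else some (PySem.Set.ofList l)
    | none => none
  -- pop_to_samples = {"Autumn": [], "North": [], "Central": [], "South": []}
  let init : PySem.Dict String (List String) :=
    ((((PySem.Dict.empty).insert "Autumn" []).insert "North" []).insert "Central" []).insert "South" []
  -- for sample_id, pop in sample_to_pop.items(): …
  let final :=
    (PySem.Dict.ofList sample_to_pop).items.foldl
      (fun d p =>
        if (match qc_set with
            | some s => !(PySem.Set.contains s p.1)
            | none => false) then d
        else if d.contains p.2 then d.modify p.2 [] (· ++ [p.1]) else d)
      init
  final.items

-- ===== PORT B =====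
def get_individuals_per_population_alt (sample_to_pop : List (String × String)) (qc_passed_filter : Option (List String)) : List (String × List String) :=
  let qc_set : Option (PySem.Set String) :=
    match qc_passed_filter with
    | some l => if l.isEmpty then none else some (PySem.Set.ofList l)
    | none => none
  let keep : String → Bool := fun sid =>
    match qc_set with
    | none => true
    | some s => PySem.Set.contains s sid
  let items := (PySem.Dict.ofList sample_to_pop).items
  ["Autumn", "North", "Central", "South"].map
    (fun pop => (pop, (items.filter (fun p => p.2 == pop && keep p.1)).map (·.1)))

-- ===== PRECONDITION & SPEC =====
def Spec_get_individuals_per_population (sample_to_pop : List (String × String)) (qc_passed_filter : Option (List String)) (out : List (String × List String)) : Prop := out = get_individuals_per_population_alt sample_to_pop qc_passed_filter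
instance (sample_to_pop : List (String × String)) (qc_passed_filter : Option (List String)) (out : List (String × List String)) : Decidable (Spec_get_individuals_per_population sample_to_pop qc_passed_filter out) := by unfold Spec_get_individuals_per_population; infer_instance

-- ===== CLAIM (what is proved, stated in full; the proofs are below) =====
def Claim_equal_get_individuals_per_population : Prop := ∀ (sample_to_pop : List (String × String)) (qc_passed_filter : Option (List String)), Dom_get_individuals_per_population sample_to_pop qc_passed_filter → Spec_get_individuals_per_population sample_to_pop qc_passed_filter (get_individuals_per_population sample_to_pop qc_passed_filter)

-- ===== LEMMAS AND PROOFS =====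

-- the four-bucket dict A maintains, abstract in the bucket contents
def pvMkd (a n c s : List String) : PySem.Dict String (List String) :=
  PySem.Dict.mk [("Autumn", a), ("North", n), ("Central", c), ("South", s)]

-- B's keep predicate
def pvKeep (qc : Option (PySem.Set String)) (sid : String) : Bool :=
  match qc with
  | none => true
  | some s => PySem.Set.contains s sid

-- what B collects for one population
def pvF (qc : Option (PySem.Set String)) (l : List (String × String)) (pop : String) : List String :=
  (l.filter (fun p => p.2 == pop && pvKeep qc p.1)).map (·.1)

-- A's loop body
def pvStep (qc : Option (PySem.Set String)) (d : PySem.Dict String (List String)) (p : String × String) : PySem.Dict String (List String) :=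
  if (match qc with
      | some s => !(PySem.Set.contains s p.1)
      | none => false) then d
  else if d.contains p.2 then d.modify p.2 [] (· ++ [p.1]) else d

lemma pvStep_eq (qc : Option (PySem.Set String)) (d : PySem.Dict String (List String)) (p : String × String) :
    pvStep qc d p =
      if pvKeep qc p.1 then (if d.contains p.2 then d.modify p.2 [] (· ++ [p.1]) else d) else d := by
  cases qc with
  | none => simp [pvStep, pvKeep]
  | some s =>
    simp only [pvStep, pvKeep]
    by_cases hc : s.contains p.1 = true
    · simp [hc]
    · simp only [Bool.not_eq_true] at hc; simp [hc]

lemma pvStep_eval (qc : Option (PySem.Set String)) (a n c s : List String) (sid pop : String) :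
    pvStep qc (pvMkd a n c s) (sid, pop) =
      pvMkd (a ++ if pop == "Autumn" && pvKeep qc sid then [sid] else [])
            (n ++ if pop == "North" && pvKeep qc sid then [sid] else [])
            (c ++ if pop == "Central" && pvKeep qc sid then [sid] else [])
            (s ++ if pop == "South" && pvKeep qc sid then [sid] else []) := by
  rw [pvStep_eq]
  by_cases hk : pvKeep qc sid = true
  · by_cases hA : pop = "Autumn"
    · subst hA
      simp [hk, pvMkd, PySem.Dict.contains, PySem.Dict.modify, PySem.Dict.insert,
        PySem.Dict.getD, PySem.Dict.get?]
    · by_cases hN : pop = "North"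
      · subst hN
        simp [hk, pvMkd, PySem.Dict.contains, PySem.Dict.modify, PySem.Dict.insert,
          PySem.Dict.getD, PySem.Dict.get?]
      · by_cases hC : pop = "Central"
        · subst hC
          simp [hk, pvMkd, PySem.Dict.contains, PySem.Dict.modify, PySem.Dict.insert,
            PySem.Dict.getD, PySem.Dict.get?]
        · by_cases hS : pop = "South"
          · subst hS
            simp [hk, pvMkd, PySem.Dict.contains, PySem.Dict.modify, PySem.Dict.insert,
              PySem.Dict.getD, PySem.Dict.get?]
          · simp [hk, pvMkd, PySem.Dict.contains, hA, hN, hC, hS,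
              Ne.symm hA, Ne.symm hN, Ne.symm hC, Ne.symm hS]
  · simp at hk
    simp [hk]

lemma pvFold_mkd (qc : Option (PySem.Set String)) (l : List (String × String)) (a n c s : List String) :
    l.foldl (pvStep qc) (pvMkd a n c s) =
      pvMkd (a ++ pvF qc l "Autumn") (n ++ pvF qc l "North")
            (c ++ pvF qc l "Central") (s ++ pvF qc l "South") := by
  induction l generalizing a n c s with
  | nil => simp [pvF]
  | cons hd tl ih =>
    obtain ⟨sid, pop⟩ := hd
    rw [List.foldl_cons, pvStep_eval, ih]
    simp only [pvF, List.filter_cons]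
    by_cases hk : pvKeep qc sid = true <;>
      by_cases hA : pop = "Autumn" <;> by_cases hN : pop = "North" <;>
      by_cases hC : pop = "Central" <;> by_cases hS : pop = "South" <;>
      simp_all [pvMkd]

lemma pvMain (qcs : Option (PySem.Set String)) (l : List (String × String)) :
    (l.foldl (pvStep qcs) (pvMkd [] [] [] [])).items =
      ["Autumn", "North", "Central", "South"].map
        (fun pop => (pop, (l.filter (fun p => p.2 == pop && pvKeep qcs p.1)).map (·.1))) := by
  rw [pvFold_mkd]
  simp [pvMkd, pvF]

-- ===== VERDICT (by name: the statement is the Claim_ definition above) =====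
theorem get_individuals_per_population_spec : Claim_equal_get_individuals_per_population := by
  intro stp qc _
  show get_individuals_per_population stp qc = get_individuals_per_population_alt stp qc
  cases qc with
  | none => exact pvMain none (PySem.Dict.ofList stp).items
  | some l =>
    by_cases h : l.isEmpty
    · simp only [get_individuals_per_population, get_individuals_per_population_alt, h, if_pos]
      exact pvMain none (PySem.Dict.ofList stp).items
    · simp only [get_individuals_per_population, get_individuals_per_population_alt, h, if_neg,
        Bool.false_eq_true, not_false_eq_true]
      exact pvMain (some (PySem.Set.ofList l)) (PySem.Dict.ofList stp).items
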